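-- pv_equiv track=rewrite | github.com/docToolchain/aoc-2020 | day13/python/t-pi/solution.py | get_next_bus
-- ===== SOURCE A (Python) =====
-- def get_next_bus(timestamp, schedule):
--     ''' Return (next bus, delay) after given timestamp
--     '''
--     delta = 0
--     while (delta < 10):
--         for bus in schedule.keys():
--             if (((timestamp+delta) % bus) == 0):
--                 return (bus, delta)
--         delta += 1
--     return (0, -1)
-- ===== SOURCE B (Python) =====
-- def get_next_bus(timestamp, schedule):
--     ''' Return (next bus, delay) after given timestamp
--     '''
--     best = None
--     for bus in schedule.keys():
--         d = (-timestamp) % abs(bus)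
--         if d < 10 and (best is None or d < best[1]):
--             best = (bus, d)
--     return best if best is not None else (0, -1)
-- ===== Notes on version B (the rewrite author's own statement) =====
-- stated objective: idiomatic
-- what changed: replaces the delta-major nested scan (up to 10 passes over the keys with early return) by a single pass over the keys that computes each bus's next delay in closed form as (-timestamp) % abs(bus) and keeps a stable minimum
-- outside the precondition, e.g. on get_next_bus(0, {1: 1, 0: 0}): A returns (1, 0), B raises ZeroDivisionError
import Mathlib
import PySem

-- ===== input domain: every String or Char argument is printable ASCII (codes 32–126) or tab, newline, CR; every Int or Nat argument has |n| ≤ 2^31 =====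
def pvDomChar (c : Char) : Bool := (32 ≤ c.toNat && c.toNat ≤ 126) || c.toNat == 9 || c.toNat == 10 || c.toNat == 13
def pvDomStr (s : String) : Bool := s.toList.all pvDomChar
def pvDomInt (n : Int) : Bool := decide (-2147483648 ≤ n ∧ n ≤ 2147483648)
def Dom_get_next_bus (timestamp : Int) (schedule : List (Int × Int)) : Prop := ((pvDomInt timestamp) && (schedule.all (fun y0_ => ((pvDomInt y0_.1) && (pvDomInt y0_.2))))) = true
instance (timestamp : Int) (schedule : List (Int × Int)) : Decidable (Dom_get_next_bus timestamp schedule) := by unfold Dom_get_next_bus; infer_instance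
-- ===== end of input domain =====

-- B replaces A's delta-major rescan of the keys by one per-bus closed-form pass with a stable minimum (equal return values proved below).

-- ===== PORT A =====
-- 'while (delta < 10)': fuel counts the remaining iterations (10 - delta);
-- the inner 'for bus in schedule.keys(): if …: return' is find? over the keys.
def get_next_bus_loop (timestamp : Int) (keys : List Int) (delta : Int) : Nat → Int × Int
  | 0 => (0, -1)
  | fuel + 1 =>
    match keys.find? (fun bus => PySem.Int.mod (timestamp + delta) bus == 0) with
    | some bus => (bus, delta)
    | none => get_next_bus_loop timestamp keys (delta + 1) fuel

-- schedule.keys(): first occurrences of the keys, in insertion order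
def get_next_bus (timestamp : Int) (schedule : List (Int × Int)) : Int × Int :=
  get_next_bus_loop timestamp (PySem.List.dedup (schedule.map Prod.fst)) 0 10

-- ===== PORT B =====
-- d = (-timestamp) % abs(bus): the closed-form next delay B computes for one bus
def pvDelay (t bus : Int) : Int := PySem.Int.mod (-t) |bus|

-- loop body of B's single pass: keep (bus, d) if d < 10 and smaller than the best so far
def get_next_bus_step (timestamp : Int) (best : Option (Int × Int)) (bus : Int) : Option (Int × Int) :=
  if pvDelay timestamp bus < 10 then
    match best with
    | none => some (bus, pvDelay timestamp bus)
    | some p => if pvDelay timestamp bus < p.2 then some (bus, pvDelay timestamp bus) else best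
  else best

def get_next_bus_alt (timestamp : Int) (schedule : List (Int × Int)) : Int × Int :=
  match (PySem.List.dedup (schedule.map Prod.fst)).foldl (get_next_bus_step timestamp) none with
  | some p => p
  | none => (0, -1)

-- ===== PRECONDITION & SPEC =====
-- Pre_ excludes schedules containing a bus id 0: there B's per-bus modulus always raises ZeroDivisionError,
-- while A raises unless some earlier key happens to divide timestamp first.
def Pre_get_next_bus (timestamp : Int) (schedule : List (Int × Int)) : Prop :=
  ∀ p ∈ schedule, p.1 ≠ 0

instance (timestamp : Int) (schedule : List (Int × Int)) : Decidable (Pre_get_next_bus timestamp schedule) := by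
  unfold Pre_get_next_bus; infer_instance

def pvWitness_get_next_bus : Int × (List (Int × Int)) := (0, [(7, 0)])

def Spec_get_next_bus (timestamp : Int) (schedule : List (Int × Int)) (out : Int × Int) : Prop := out = get_next_bus_alt timestamp schedule
instance (timestamp : Int) (schedule : List (Int × Int)) (out : Int × Int) : Decidable (Spec_get_next_bus timestamp schedule out) := by unfold Spec_get_next_bus; infer_instance

-- ===== CLAIM (what is proved, stated in full; the proofs are below) =====
def Claim_equal_get_next_bus : Prop := ∀ (timestamp : Int) (schedule : List (Int × Int)), Dom_get_next_bus timestamp schedule → Pre_get_next_bus timestamp schedule → Spec_get_next_bus timestamp schedule (get_next_bus timestamp schedule)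

-- ===== LEMMAS AND PROOFS =====

lemma pvDelay_nonneg (t bus : Int) (h : bus ≠ 0) : 0 ≤ pvDelay t bus :=
  PySem.Int.mod_nonneg _ (abs_pos.mpr h)

lemma pvDelay_lt (t bus : Int) (h : bus ≠ 0) : pvDelay t bus < |bus| :=
  PySem.Int.mod_lt _ (abs_pos.mpr h)

-- the two branches of B's loop body, written out
lemma pv_step_none (t bus : Int) :
    get_next_bus_step t none bus =
      if pvDelay t bus < 10 then some (bus, pvDelay t bus) else none := by
  unfold get_next_bus_step; split_ifs <;> rfl

lemma pv_step_some (t bus x e : Int) :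
    get_next_bus_step t (some (x, e)) bus =
      if pvDelay t bus < 10 ∧ pvDelay t bus < e then some (bus, pvDelay t bus)
      else some (x, e) := by
  unfold get_next_bus_step
  by_cases h1 : pvDelay t bus < 10 <;> by_cases h2 : pvDelay t bus < e <;>
    simp [h1, h2]

-- A's inner test at offset delta fires exactly on the buses whose closed-form delay IS delta,
-- provided no bus has a delay below delta (A's loop invariant).
lemma pv_match_iff (t delta bus : Int) (h0 : bus ≠ 0) (hd : 0 ≤ delta)
    (hle : delta ≤ pvDelay t bus) :
    (PySem.Int.mod (t + delta) bus = 0) ↔ pvDelay t bus = delta := by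
  have hB : 0 < |bus| := abs_pos.mpr h0
  have hr : pvDelay t bus = (-t) % |bus| := PySem.Int.mod_eq_emod_of_pos hB
  have hrlt : (-t) % |bus| < |bus| := by rw [← hr]; exact pvDelay_lt t bus h0
  rw [PySem.Int.mod_eq_zero_iff_dvd, hr]
  rw [hr] at hle
  have hdv : |bus| ∣ (-t - (-t) % |bus|) :=
    ⟨(-t) / |bus|, by rw [Int.emod_def]; ring⟩
  constructor
  · intro hbus
    have habs : |bus| ∣ (t + delta) := (abs_dvd bus (t + delta)).mpr hbus
    have hsum : |bus| ∣ ((t + delta) + (-t - (-t) % |bus|)) := dvd_add habs hdv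
    rw [show (t + delta) + (-t - (-t) % |bus|) = delta - (-t) % |bus| by ring] at hsum
    obtain ⟨k, hk⟩ := hsum
    rcases lt_trichotomy k 0 with hlt | heq0 | hgt
    · have h1 : |bus| * k ≤ |bus| * (-1) :=
        mul_le_mul_of_nonneg_left (by omega) (le_of_lt hB)
      rw [mul_neg_one] at h1
      omega
    · rw [heq0, mul_zero] at hk; omega
    · have h1 : |bus| * 1 ≤ |bus| * k :=
        mul_le_mul_of_nonneg_left (by omega) (le_of_lt hB)
      rw [mul_one] at h1
      omega
  · intro heq
    have h2 : |bus| ∣ -(-t - (-t) % |bus|) := dvd_neg.mpr hdv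
    rw [show -(-t - (-t) % |bus|) = t + (-t) % |bus| by ring, heq] at h2
    exact (abs_dvd bus (t + delta)).mp h2

-- find? only depends on the predicate's values on the list's members
lemma pv_find?_congr {α : Type} (p q : α → Bool) :
    ∀ (l : List α), (∀ x ∈ l, p x = q x) → l.find? p = l.find? q
  | [], _ => rfl
  | x :: l, h => by
    simp only [List.find?]
    rw [h x (List.mem_cons_self)]
    cases hq : q x
    · exact pv_find?_congr p q l (fun y hy => h y (List.mem_cons_of_mem _ hy))
    · rfl

-- once the best candidate's delay is a lower bound of all remaining delays, the fold keeps it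
lemma pv_fold_keep (t x e : Int) :
    ∀ (keys : List Int), (∀ b ∈ keys, e ≤ pvDelay t b) →
      keys.foldl (get_next_bus_step t) (some (x, e)) = some (x, e)
  | [], _ => rfl
  | b :: keys, h => by
    have hbe : e ≤ pvDelay t b := h b (List.mem_cons_self)
    rw [List.foldl_cons, pv_step_some, if_neg (by omega)]
    exact pv_fold_keep t x e keys (fun y hy => h y (List.mem_cons_of_mem _ hy))

-- if no bus qualifies (all delays ≥ 10), the fold produces nothing
lemma pv_fold_none (t : Int) :
    ∀ (keys : List Int), (∀ b ∈ keys, ¬ pvDelay t b < 10) →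
      keys.foldl (get_next_bus_step t) none = none
  | [], _ => rfl
  | b :: keys, h => by
    rw [List.foldl_cons, pv_step_none, if_neg (h b (List.mem_cons_self))]
    exact pv_fold_none t keys (fun y hy => h y (List.mem_cons_of_mem _ hy))

-- when delta is a lower bound of all delays and b0 is the first bus with delay exactly delta,
-- B's fold returns (b0, delta), whatever strictly-worse accumulator it starts from
lemma pv_fold_min (t delta : Int) (hδ : delta < 10) :
    ∀ (keys : List Int) (acc : Option (Int × Int)) (b0 : Int),
      (∀ b ∈ keys, delta ≤ pvDelay t b) →
      keys.find? (fun b => pvDelay t b == delta) = some b0 →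
      (acc = none ∨ ∃ x e, acc = some (x, e) ∧ delta < e) →
      keys.foldl (get_next_bus_step t) acc = some (b0, delta)
  | [], acc, b0, _, hfind, _ => by simp at hfind
  | b :: keys, acc, b0, hinv, hfind, hacc => by
    rw [List.foldl_cons]
    by_cases hb : pvDelay t b = delta
    · have hb0 : b0 = b := by
        rw [List.find?_cons_of_pos (by simp [hb])] at hfind
        exact (Option.some_injective _ hfind).symm
      have hstep : get_next_bus_step t acc b = some (b, delta) := by
        rcases hacc with rfl | ⟨x, e, rfl, he⟩
        · rw [pv_step_none, if_pos (by rw [hb]; exact hδ), hb]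
        · rw [pv_step_some, if_pos ⟨by rw [hb]; exact hδ, by rw [hb]; exact he⟩, hb]
      rw [hstep, hb0]
      exact pv_fold_keep t b delta keys (fun y hy => hinv y (List.mem_cons_of_mem _ hy))
    · have hfind' : keys.find? (fun b => pvDelay t b == delta) = some b0 := by
        rwa [List.find?_cons_of_neg (by simp [hb])] at hfind
      have hbgt : delta < pvDelay t b := by
        have := hinv b (List.mem_cons_self); omega
      have hacc' : get_next_bus_step t acc b = none ∨
          ∃ x e, get_next_bus_step t acc b = some (x, e) ∧ delta < e := by
        rcases hacc with rfl | ⟨x, e, rfl, he⟩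
        · rw [pv_step_none]
          split_ifs with h10
          · exact Or.inr ⟨b, pvDelay t b, rfl, hbgt⟩
          · exact Or.inl rfl
        · rw [pv_step_some]
          split_ifs with h10
          · exact Or.inr ⟨b, pvDelay t b, rfl, hbgt⟩
          · exact Or.inr ⟨x, e, rfl, he⟩
      exact pv_fold_min t delta hδ keys _ b0
        (fun y hy => hinv y (List.mem_cons_of_mem _ hy)) hfind' hacc'

-- the bridge: A's remaining delta-loop computes exactly what B's single fold computes
lemma pv_bridge (t : Int) (keys : List Int) (h0 : ∀ b ∈ keys, b ≠ 0) :
    ∀ (fuel : Nat) (delta : Int), delta + (fuel : Int) = 10 → 0 ≤ delta →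
      (∀ b ∈ keys, delta ≤ pvDelay t b) →
      get_next_bus_loop t keys delta fuel =
        (match keys.foldl (get_next_bus_step t) none with
         | some p => p
         | none => (0, -1))
  | 0, delta, hsum, _, hinv => by
    have hnone : keys.foldl (get_next_bus_step t) none = none :=
      pv_fold_none t keys (fun b hb => by have := hinv b hb; push_cast at hsum; omega)
    rw [hnone]; rfl
  | fuel + 1, delta, hsum, hpos, hinv => by
    have hδ : delta < 10 := by push_cast at hsum; omega
    have hcong : keys.find? (fun bus => PySem.Int.mod (t + delta) bus == 0)
        = keys.find? (fun b => pvDelay t b == delta) := by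
      apply pv_find?_congr
      intro b hb
      rw [Bool.eq_iff_iff]
      simp only [beq_iff_eq]
      exact pv_match_iff t delta b (h0 b hb) hpos (hinv b hb)
    simp only [get_next_bus_loop]
    rw [hcong]
    cases hfind : keys.find? (fun b => pvDelay t b == delta) with
    | some b0 =>
      rw [pv_fold_min t delta hδ keys none b0 hinv hfind (Or.inl rfl)]
    | none =>
      have hinv' : ∀ b ∈ keys, delta + 1 ≤ pvDelay t b := by
        intro b hb
        have h1 := hinv b hb
        have h2 := List.find?_eq_none.mp hfind b hb
        simp only [beq_iff_eq] at h2
        omega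
      exact pv_bridge t keys h0 fuel (delta + 1) (by push_cast at *; omega) (by omega) hinv'

-- ===== VERDICT (by name: the statement is the Claim_ definition above) =====
theorem get_next_bus_spec : Claim_equal_get_next_bus := by
  intro t schedule _ hpre
  unfold Spec_get_next_bus get_next_bus get_next_bus_alt
  have h0 : ∀ b ∈ PySem.List.dedup (schedule.map Prod.fst), b ≠ 0 := by
    intro b hb
    have hb' : b ∈ schedule.map Prod.fst := (PySem.List.mem_dedup _ _).mp hb
    obtain ⟨p, hp, rfl⟩ := List.mem_map.mp hb'
    exact hpre p hp
  exact pv_bridge t _ h0 10 0 (by norm_num) (by norm_num)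
    (fun b hb => pvDelay_nonneg t b (h0 b hb))
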